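-- pv_equiv track=rewrite | github.com/jeongsungjin/Algorithm | beakjoon/23291-p5-어항정리.py | fold_and_stack
-- ===== SOURCE A (Python) =====
-- def fold_and_stack(arr):
--     N = len(arr)
--     # 5-1. 왼쪽 N/2개를 180도 회전시켜 오른쪽 N/2개 위에 놓기
--     first_fold = [arr[:N//2][::-1], arr[N//2:]]
--
--     # 5-2. 왼쪽 N/4개를 180도 회전시켜 오른쪽 N/4개 위에 놓기
--     left_block = [row[:N//4] for row in first_fold]
--     right_block = [row[N//4:] for row in first_fold]
--
--     # 180도 회전: 행 순서 뒤집고, 각 행 내용물 뒤집기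
--     rotated_left = [row[::-1] for row in left_block[::-1]]
--
--     # 쌓기
--     final_stack = rotated_left + right_block
--     return final_stack
-- ===== SOURCE B (Python) =====
-- def fold_and_stack(arr):
--     # Build each of the 4 output rows directly by index arithmetic (gather),
--     # instead of A's staged fold/split/rotate of intermediate lists.
--     N = len(arr)
--     h = N // 2
--     q = N // 4
--     return [
--         [arr[h + q - 1 - j] for j in range(q)],
--         [arr[h - q + j] for j in range(q)],
--         [arr[h - q - 1 - j] for j in range(h - q)],
--         [arr[h + q + j] for j in range(N - h - q)],
--     ]
-- ===== Notes on version B (the rewrite author's own statement) =====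
-- stated objective: alternative
-- what changed: B computes each of the four output rows directly from arr by closed-form index arithmetic (a gather comprehension per row), eliminating A's staged pipeline of intermediate lists (first_fold, left/right blocks, rotated block) built by slicing and reversing.
import Mathlib
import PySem

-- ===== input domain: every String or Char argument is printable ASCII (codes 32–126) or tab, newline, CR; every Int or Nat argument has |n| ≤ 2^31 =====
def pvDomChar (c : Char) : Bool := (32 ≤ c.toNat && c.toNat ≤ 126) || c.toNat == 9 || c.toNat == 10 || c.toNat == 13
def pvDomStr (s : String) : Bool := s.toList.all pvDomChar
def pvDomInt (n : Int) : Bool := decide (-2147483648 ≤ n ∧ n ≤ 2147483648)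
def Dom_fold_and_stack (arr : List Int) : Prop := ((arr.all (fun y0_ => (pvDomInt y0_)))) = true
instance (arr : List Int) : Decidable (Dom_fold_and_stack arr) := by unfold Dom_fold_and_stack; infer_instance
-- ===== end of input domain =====

-- B builds each of the four output rows directly from arr by index arithmetic (one gather
-- comprehension per row) instead of A's staged fold/split/rotate of intermediate lists; same O(N) cost.

-- ===== PORT A =====
-- xs[::-1]; step -1 never raises, so the Option is always some (PySem.List.slice?_none_none_neg_one)
def pyRev {α : Type} (xs : List α) : List α := (PySem.List.slice? xs none none (-1)).getD []

def fold_and_stack (arr : List Int) : List (List Int) :=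
  let N : Int := (arr.length : Int)
  -- first_fold = [arr[:N//2][::-1], arr[N//2:]]
  let first_fold : List (List Int) :=
    [pyRev (PySem.List.slice arr none (some (PySem.Int.floordiv N 2))),
     PySem.List.slice arr (some (PySem.Int.floordiv N 2)) none]
  -- left_block = [row[:N//4] for row in first_fold]
  let left_block := first_fold.map (fun row => PySem.List.slice row none (some (PySem.Int.floordiv N 4)))
  -- right_block = [row[N//4:] for row in first_fold]
  let right_block := first_fold.map (fun row => PySem.List.slice row (some (PySem.Int.floordiv N 4)) none)
  -- rotated_left = [row[::-1] for row in left_block[::-1]]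
  let rotated_left := (pyRev left_block).map (fun row => pyRev row)
  rotated_left ++ right_block

-- ===== PORT B =====
-- arr[...] in B is only evaluated at indices the row bounds keep in range, so pyGetD … 0 is exact there.
def fold_and_stack_alt (arr : List Int) : List (List Int) :=
  let N := arr.length
  let h := N / 2
  let q := N / 4
  [(PySem.List.pyRange 0 (q : Int)).map (fun j => PySem.List.pyGetD arr ((h : Int) + (q : Int) - 1 - j) 0),
   (PySem.List.pyRange 0 (q : Int)).map (fun j => PySem.List.pyGetD arr ((h : Int) - (q : Int) + j) 0),
   (PySem.List.pyRange 0 ((h : Int) - (q : Int))).map (fun j => PySem.List.pyGetD arr ((h : Int) - (q : Int) - 1 - j) 0),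
   (PySem.List.pyRange 0 ((N : Int) - (h : Int) - (q : Int))).map (fun j => PySem.List.pyGetD arr ((h : Int) + (q : Int) + j) 0)]

-- ===== PRECONDITION & SPEC =====
def Spec_fold_and_stack (arr : List Int) (out : List (List Int)) : Prop := out = fold_and_stack_alt arr
instance (arr : List Int) (out : List (List Int)) : Decidable (Spec_fold_and_stack arr out) := by unfold Spec_fold_and_stack; infer_instance

-- ===== CLAIM (what is proved, stated in full; the proofs are below) =====
def Claim_equal_fold_and_stack : Prop := ∀ (arr : List Int), Dom_fold_and_stack arr → Spec_fold_and_stack arr (fold_and_stack arr)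

-- ===== LEMMAS AND PROOFS =====

-- B's row 0 gather equals A's rotated right half of the top fold: arr[h:h+q][::-1]
theorem row0 (arr : List Int) (h q : Nat) (hhq : h + q ≤ arr.length) :
    List.map (fun j => PySem.List.pyGetD arr ((h : Int) + (q : Int) - 1 - j) 0) (PySem.List.pyRange 0 (q : Int))
      = (List.take q (List.drop h arr)).reverse := by
  rw [PySem.List.pyRange_zero_natCast, List.map_map]
  apply List.ext_getElem
  · simp; omega
  · intro i hi1 hi2
    simp only [List.length_map, List.length_range] at hi1
    simp only [List.getElem_map, Function.comp_apply, List.getElem_range, List.getElem_reverse,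
      List.getElem_take, List.getElem_drop, List.length_take, List.length_drop]
    rw [PySem.List.pyGetD_eq_getElem arr 0 (by omega) (by omega)]
    congr 1
    omega

-- B's row 1 gather equals A's doubly-reversed left quarter of the folded top row
theorem row1 (arr : List Int) (h q : Nat) (hq : q ≤ h) (hh : h ≤ arr.length) :
    List.map (fun j => PySem.List.pyGetD arr (((h - q : Nat) : Int) + j) 0) (PySem.List.pyRange 0 (q : Int))
      = (List.take q (List.take h arr).reverse).reverse := by
  rw [PySem.List.pyRange_zero_natCast, List.map_map]
  apply List.ext_getElem
  · simp; omega
  · intro i hi1 hi2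
    simp only [List.length_map, List.length_range] at hi1
    simp only [List.getElem_map, Function.comp_apply, List.getElem_range, List.getElem_reverse,
      List.getElem_take, List.length_take, List.length_reverse]
    rw [PySem.List.pyGetD_eq_getElem arr 0 (by omega) (by omega)]
    congr 1
    omega

-- B's row 2 gather equals A's remaining (right) part of the reversed left half
theorem row2 (arr : List Int) (h q : Nat) (hq : q ≤ h) (hh : h ≤ arr.length) :
    List.map (fun j => PySem.List.pyGetD arr (((h - q : Nat) : Int) - 1 - j) 0) (PySem.List.pyRange 0 ((h - q : Nat) : Int))
      = List.drop q (List.take h arr).reverse := by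
  rw [PySem.List.pyRange_zero_natCast, List.map_map]
  apply List.ext_getElem
  · simp; omega
  · intro i hi1 hi2
    simp only [List.length_map, List.length_range] at hi1
    simp only [List.getElem_map, Function.comp_apply, List.getElem_range, List.getElem_reverse,
      List.getElem_take, List.getElem_drop, List.length_take]
    rw [PySem.List.pyGetD_eq_getElem arr 0 (by omega) (by omega)]
    congr 1
    omega

-- B's row 3 gather equals A's untouched tail arr[h+q:]
theorem row3 (arr : List Int) (h q : Nat) (hhq : h + q ≤ arr.length) :
    List.map (fun j => PySem.List.pyGetD arr ((h : Int) + (q : Int) + j) 0) (PySem.List.pyRange 0 ((arr.length - h - q : Nat) : Int))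
      = List.drop q (List.drop h arr) := by
  rw [PySem.List.pyRange_zero_natCast, List.map_map]
  apply List.ext_getElem
  · simp; omega
  · intro i hi1 hi2
    simp only [List.length_map, List.length_range] at hi1
    simp only [List.getElem_map, Function.comp_apply, List.getElem_range, List.getElem_drop]
    rw [PySem.List.pyGetD_eq_getElem arr 0 (by omega) (by omega)]
    congr 1
    omega

-- ===== VERDICT (by name: the statement is the Claim_ definition above) =====
theorem fold_and_stack_spec : Claim_equal_fold_and_stack := by
  intro arr _
  unfold Spec_fold_and_stack fold_and_stack fold_and_stack_alt pyRev
  have hfd2 : PySem.Int.floordiv ((arr.length : Int)) 2 = ((arr.length / 2 : Nat) : Int) := by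
    exact_mod_cast PySem.Int.floordiv_natCast arr.length 2
  have hfd4 : PySem.Int.floordiv ((arr.length : Int)) 4 = ((arr.length / 4 : Nat) : Int) := by
    exact_mod_cast PySem.Int.floordiv_natCast arr.length 4
  have e1 : ((arr.length / 2 : Nat) : Int) - ((arr.length / 4 : Nat) : Int)
      = ((arr.length / 2 - arr.length / 4 : Nat) : Int) := by omega
  have e2 : ((arr.length : Nat) : Int) - ((arr.length / 2 : Nat) : Int) - ((arr.length / 4 : Nat) : Int)
      = ((arr.length - arr.length / 2 - arr.length / 4 : Nat) : Int) := by omega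
  simp only [hfd2, hfd4, e1, e2, PySem.List.slice?_none_none_neg_one, Option.getD_some,
    PySem.List.slice_to_natCast, PySem.List.slice_from_natCast,
    List.map_cons, List.map_nil, List.reverse_cons, List.reverse_nil, List.nil_append,
    List.cons_append]
  rw [row0 arr (arr.length / 2) (arr.length / 4) (by omega),
      row1 arr (arr.length / 2) (arr.length / 4) (by omega) (by omega),
      row2 arr (arr.length / 2) (arr.length / 4) (by omega) (by omega),
      row3 arr (arr.length / 2) (arr.length / 4) (by omega)]
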